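-- pv_equiv track=rewrite | github.com/emese02/Einfache-Aufgaben-in-Python | main.py | anzahl_sym
-- ===== SOURCE A (Python) =====
-- def anzahl_sym (liste):
--     nr = 0
--     for i in range (len(liste)):
--         umgekehrt = liste[i] % 10 * 10 + liste[i] // 10
--         for j in range (i+1, len(liste)):
--             if umgekehrt == liste[j] :
--                 nr += 1
--     return nr
-- ===== SOURCE B (Python) =====
-- def anzahl_sym(liste):
--     # one pass: count, for each element, how many earlier elements reverse to it
--     seen = {}
--     nr = 0
--     for x in liste:
--         nr += seen.get(x, 0)
--         r = x % 10 * 10 + x // 10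
--         seen[r] = seen.get(r, 0) + 1
--     return nr
-- ===== Notes on version B (the rewrite author's own statement) =====
-- stated objective: faster
-- what changed: Replaced the nested index loops (for each i, scan the rest of the list for the reversed value) by a single pass that keeps a Counter of the reversed values of the elements seen so far and adds its count at each element.
import Mathlib
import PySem

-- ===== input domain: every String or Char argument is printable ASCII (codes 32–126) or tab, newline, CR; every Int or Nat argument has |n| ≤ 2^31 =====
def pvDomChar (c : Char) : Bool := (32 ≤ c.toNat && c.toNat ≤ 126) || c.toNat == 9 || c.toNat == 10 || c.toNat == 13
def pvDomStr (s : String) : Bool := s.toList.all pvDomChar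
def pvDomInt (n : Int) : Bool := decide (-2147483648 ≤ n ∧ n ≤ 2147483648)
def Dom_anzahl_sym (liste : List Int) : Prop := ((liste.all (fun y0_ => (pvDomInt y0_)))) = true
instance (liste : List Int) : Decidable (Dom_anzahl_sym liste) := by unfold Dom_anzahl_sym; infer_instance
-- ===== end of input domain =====

-- B replaces A's nested quadratic index scan by one linear pass keeping a dict of reversed values seen so far.

-- shared arithmetic of both Pythons: x % 10 * 10 + x // 10 (Python floor semantics)
def pvRev (x : Int) : Int := PySem.Int.mod x 10 * 10 + PySem.Int.floordiv x 10

-- ===== PORT A =====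
def anzahl_sym (liste : List Int) : Int :=
  (PySem.List.pyRange 0 (liste.length : Int) 1).foldl (fun nr i =>
    let umgekehrt := pvRev (PySem.List.pyGetD liste i 0)
    (PySem.List.pyRange (i + 1) (liste.length : Int) 1).foldl
      (fun nr j => if umgekehrt == PySem.List.pyGetD liste j 0 then nr + 1 else nr) nr) 0

-- ===== PORT B =====
def anzahl_sym_alt (liste : List Int) : Int :=
  (liste.foldl (fun (st : PySem.Dict Int Int × Int) x =>
      let nr := st.2 + st.1.getD x 0
      let r := pvRev x
      (st.1.insert r (st.1.getD r 0 + 1), nr))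
    (PySem.Dict.empty, 0)).2

-- ===== PRECONDITION & SPEC =====
def Spec_anzahl_sym (liste : List Int) (out : Int) : Prop := out = anzahl_sym_alt liste
instance (liste : List Int) (out : Int) : Decidable (Spec_anzahl_sym liste out) := by unfold Spec_anzahl_sym; infer_instance

-- ===== CLAIM (what is proved, stated in full; the proofs are below) =====
def Claim_equal_anzahl_sym : Prop := ∀ (liste : List Int), Dom_anzahl_sym liste → Spec_anzahl_sym liste (anzahl_sym liste)

-- ===== LEMMAS AND PROOFS =====

-- number of pairs i < j with pvRev (l i) = l j, in structural form (common target of both ports)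
def pairCount : List Int → Int
  | [] => 0
  | x :: xs => (xs.count (pvRev x) : Int) + pairCount xs

theorem countP_beq (u : Int) (xs : List Int) : (xs.countP (fun y => u == y)) = xs.count u := by
  rw [List.count]
  apply List.countP_congr
  intro y _
  simp only [beq_iff_eq]
  exact eq_comm

-- A's inner loop counts u in the suffix starting at i
theorem inner_count (l : List Int) (u a i : Int) (h : 0 ≤ i) :
    (PySem.List.pyRange i (l.length : Int) 1).foldl
      (fun nr j => if u == PySem.List.pyGetD l j 0 then nr + 1 else nr) a
    = a + ((l.drop i.toNat).count u : Int) := by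
  have hb := PySem.List.foldl_pyRange_pyGetD' l 0 (fun nr y => if u == y then nr + 1 else nr) a h
  simp only at hb
  rw [hb, PySem.List.foldl_count_if, countP_beq]

theorem sum_drop_eq_pairCount (l : List Int) :
    ((List.range l.length).map fun k => ((l.drop (k+1)).count (pvRev (l.getD k 0)) : Int)).sum
    = pairCount l := by
  induction l with
  | nil => simp [pairCount]
  | cons x xs ih =>
    rw [List.length_cons, List.range_succ_eq_map, List.map_cons, List.map_map, List.sum_cons]
    rw [pairCount, ← ih]
    simp only [Function.comp_def, List.drop_succ_cons, List.getD_cons_succ, List.getD_cons_zero,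
      Nat.succ_eq_add_one, List.drop_zero]

-- A's whole double loop
theorem a_outer (l : List Int) (acc : Int) :
    (PySem.List.pyRange 0 (l.length : Int) 1).foldl (fun nr i =>
      (PySem.List.pyRange (i + 1) (l.length : Int) 1).foldl
        (fun nr j => if pvRev (PySem.List.pyGetD l i 0) == PySem.List.pyGetD l j 0 then nr + 1 else nr) nr) acc
    = acc + pairCount l := by
  rw [PySem.List.pyRange_one 0, List.foldl_map]
  have hn : (((l.length : Int)) - 0).toNat = l.length := by simp
  rw [hn]
  rw [PySem.List.foldl_congr_mem (List.range l.length) _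
    (fun nr k => nr + ((l.drop (k+1)).count (pvRev (l.getD k 0)) : Int)) acc ?_]
  · rw [PySem.List.foldl_add, sum_drop_eq_pairCount]
  · intro a k hk
    have e0 : (0 : Int) + (k : Int) = ((k : Nat) : Int) := by omega
    rw [e0, PySem.List.pyGetD_natCast]
    have e1 : ((k : Int) + 1) = ((k + 1 : Nat) : Int) := by omega
    rw [e1, inner_count l _ a _ (by positivity)]
    simp

-- B's pairs still to be counted, with p the already-processed prefix
def bCount : List Int → List Int → Int
  | _, [] => 0
  | p, x :: xs => ((p.map pvRev).count x : Int) + bCount (p ++ [x]) xs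

-- B's loop invariant: the dict holds the counts of reversed values of the processed prefix p
theorem b_inv (l : List Int) (d : PySem.Dict Int Int) (p : List Int) (nr : Int)
    (h : ∀ v, d.getD v 0 = ((p.map pvRev).count v : Int)) :
    (l.foldl (fun (st : PySem.Dict Int Int × Int) x =>
        (st.1.insert (pvRev x) (st.1.getD (pvRev x) 0 + 1), st.2 + st.1.getD x 0))
      (d, nr)).2 = nr + bCount p l := by
  induction l generalizing d p nr with
  | nil => simp [bCount]
  | cons x xs ih =>
    simp only [List.foldl_cons]
    rw [ih _ (p ++ [x]) _ ?_, h, bCount]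
    · ring
    · intro v
      rw [PySem.Dict.getD_insert, List.map_append, List.count_append, h]
      by_cases hv : v = pvRev x
      · simp [hv]
      · simp [hv, h, Ne.symm hv]

def crossC (p l : List Int) : Int := (l.map (fun y => ((p.map pvRev).count y : Int))).sum

theorem count_singleton_sum (r : Int) (xs : List Int) :
    (xs.map fun y => (([r].count y : Int))).sum = (xs.count r : Int) := by
  induction xs with
  | nil => simp
  | cons y ys ih =>
    simp only [List.map_cons, List.sum_cons, ih]
    by_cases h : y = r
    · subst h; simp [List.count_cons_self]; ring
    · simp [h, List.count_cons_of_ne (Ne.symm h)]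

theorem bCount_eq (l p : List Int) : bCount p l = crossC p l + pairCount l := by
  induction l generalizing p with
  | nil => simp [bCount, crossC, pairCount]
  | cons x xs ih =>
    rw [bCount, ih, pairCount, crossC, crossC]
    simp only [List.map_append, List.map_cons, List.map_nil, List.count_append, List.sum_cons]
    push_cast
    rw [List.sum_map_add, count_singleton_sum (pvRev x) xs]
    ring

-- ===== VERDICT (by name: the statement is the Claim_ definition above) =====
theorem anzahl_sym_spec : Claim_equal_anzahl_sym := by
  intro l _
  show anzahl_sym l = anzahl_sym_alt l
  have ha : anzahl_sym l = pairCount l := by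
    rw [anzahl_sym]
    rw [a_outer l 0]
    ring
  have hb : anzahl_sym_alt l = pairCount l := by
    rw [anzahl_sym_alt]
    have hemp : ∀ v : Int, (PySem.Dict.empty : PySem.Dict Int Int).getD v 0
        = ((([] : List Int).map pvRev).count v : Int) := by
      intro v; simp [PySem.Dict.getD_empty]
    rw [b_inv l PySem.Dict.empty [] 0 hemp, bCount_eq]
    simp [crossC]
  rw [ha, hb]
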